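-- pv_equiv track=rewrite | github.com/nayanika2304/BioInformatics | week_4/randomized_motif_search.py | profile_laplace
-- ===== SOURCE A (Python) =====
-- def profile_laplace(motifs):
--     """
--     Finds the profile matrix for given list of motifs
--
--     motifs: list of motif sequences (list)
--
--     Returns: the profile matrix for motifs (list)
--     """
--     Profile = {}
--     A, C, G, T = [], [], [], []
--     for j in range(len(motifs[0])):
--         countA, countC, countG, countT = 1,1,1,1
--         for motif in motifs:
--             if motif[j] == "A":
--                 countA += 1
--             elif motif[j] == "C":
--                 countC += 1
--             elif motif[j] == "G":
--                 countG += 1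
--             elif motif[j] == "T":
--                 countT += 1
--         A.append(countA)
--         C.append(countC)
--         G.append(countG)
--         T.append(countT)
--     Profile["A"] = A
--     Profile["C"] = C
--     Profile["G"] = G
--     Profile["T"] = T
--     return Profile
-- ===== SOURCE B (Python) =====
-- def profile_laplace(motifs):
--     """
--     Finds the profile matrix for given list of motifs
--
--     motifs: list of motif sequences (list)
--
--     Returns: the profile matrix for motifs (list)
--     """
--     L = len(motifs[0])
--     return {b: [1 + sum(m[j] == b for m in motifs) for j in range(L)]
--             for b in "ACGT"}
-- ===== Notes on version B (the rewrite author's own statement) =====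
-- stated objective: simpler
-- what changed: Replaces the column loop with four scalar accumulators and an if/elif chain by a dict comprehension that computes each base's row directly as a list of 1 + sum of per-motif equality tests.
import Mathlib
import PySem

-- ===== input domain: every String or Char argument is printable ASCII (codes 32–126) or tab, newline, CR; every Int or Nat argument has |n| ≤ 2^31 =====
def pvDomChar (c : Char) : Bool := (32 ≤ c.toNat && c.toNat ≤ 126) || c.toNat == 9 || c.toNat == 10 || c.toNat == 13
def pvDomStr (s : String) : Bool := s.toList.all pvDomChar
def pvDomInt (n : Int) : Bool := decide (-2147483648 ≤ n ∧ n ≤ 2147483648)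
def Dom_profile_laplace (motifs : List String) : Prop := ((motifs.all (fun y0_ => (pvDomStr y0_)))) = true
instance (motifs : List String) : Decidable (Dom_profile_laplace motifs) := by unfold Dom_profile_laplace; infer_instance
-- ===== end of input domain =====

-- B replaces A's column loop with four scalar accumulators and an if/elif chain by a
-- dict comprehension building each base's row directly as 1 + a sum of equality tests (same cost, simpler).


-- ===== PORT A =====
def profile_laplace (motifs : List String) : List (String × List Int) :=
  let r := (PySem.List.pyRange 0 (PySem.Str.len ((PySem.List.pyGet? motifs 0).getD "")) 1).foldl
    (fun (st : List Int × List Int × List Int × List Int) j =>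
      let c := motifs.foldl
        (fun (c : Int × Int × Int × Int) motif =>
          if PySem.Str.pyGet? motif j = some 'A' then (c.1 + 1, c.2.1, c.2.2.1, c.2.2.2)
          else if PySem.Str.pyGet? motif j = some 'C' then (c.1, c.2.1 + 1, c.2.2.1, c.2.2.2)
          else if PySem.Str.pyGet? motif j = some 'G' then (c.1, c.2.1, c.2.2.1 + 1, c.2.2.2)
          else if PySem.Str.pyGet? motif j = some 'T' then (c.1, c.2.1, c.2.2.1, c.2.2.2 + 1)
          else c)
        (1, 1, 1, 1)
      (st.1 ++ [c.1], st.2.1 ++ [c.2.1], st.2.2.1 ++ [c.2.2.1], st.2.2.2 ++ [c.2.2.2]))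
    ([], [], [], [])
  [("A", r.1), ("C", r.2.1), ("G", r.2.2.1), ("T", r.2.2.2)]

-- ===== PORT B =====
def profile_laplace_alt (motifs : List String) : List (String × List Int) :=
  let L := PySem.Str.len ((PySem.List.pyGet? motifs 0).getD "")
  "ACGT".toList.map (fun b =>
    (String.ofList [b],
     (PySem.List.pyRange 0 L 1).map (fun j =>
       1 + motifs.foldl (fun s m => s + (if PySem.Str.pyGet? m j = some b then 1 else 0)) 0)))

-- ===== PRECONDITION & SPEC =====
-- Pre_ excludes exactly the inputs where Python A raises IndexError: an empty motif list
-- (motifs[0]) or a motif shorter than the first one (motif[j]).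
def Pre_profile_laplace (motifs : List String) : Prop :=
  motifs ≠ [] ∧ ∀ m ∈ motifs, (motifs.headD "").length ≤ m.length
instance (motifs : List String) : Decidable (Pre_profile_laplace motifs) := by
  unfold Pre_profile_laplace; infer_instance
def pvWitness_profile_laplace : List String := ["AC", "GT"]
def Spec_profile_laplace (motifs : List String) (out : List (String × List Int)) : Prop := out = profile_laplace_alt motifs
instance (motifs : List String) (out : List (String × List Int)) : Decidable (Spec_profile_laplace motifs out) := by unfold Spec_profile_laplace; infer_instance

-- ===== CLAIM (what is proved, stated in full; the proofs are below) =====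
def Claim_equal_profile_laplace : Prop := ∀ (motifs : List String), Dom_profile_laplace motifs → Pre_profile_laplace motifs → Spec_profile_laplace motifs (profile_laplace motifs)

-- ===== LEMMAS AND PROOFS =====

-- per-column 0/1 sum of matches for base b (the value B adds 1 to)
def pvCnt (motifs : List String) (b : Char) (j : Int) : Int :=
  (motifs.map (fun m => if PySem.Str.pyGet? m j = some b then (1 : Int) else 0)).sum

-- A's inner fold over the motifs equals four independent match counts
lemma pl_inner (j : Int) : ∀ (ms : List String) (a c g t : Int),
    ms.foldl
      (fun (c : Int × Int × Int × Int) motif =>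
        if PySem.Str.pyGet? motif j = some 'A' then (c.1 + 1, c.2.1, c.2.2.1, c.2.2.2)
        else if PySem.Str.pyGet? motif j = some 'C' then (c.1, c.2.1 + 1, c.2.2.1, c.2.2.2)
        else if PySem.Str.pyGet? motif j = some 'G' then (c.1, c.2.1, c.2.2.1 + 1, c.2.2.2)
        else if PySem.Str.pyGet? motif j = some 'T' then (c.1, c.2.1, c.2.2.1, c.2.2.2 + 1)
        else c)
      (a, c, g, t)
    = (a + pvCnt ms 'A' j, c + pvCnt ms 'C' j, g + pvCnt ms 'G' j, t + pvCnt ms 'T' j) := by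
  intro ms
  induction ms with
  | nil => intro a c g t; simp [pvCnt]
  | cons m ms ih =>
    intro a c g t
    simp only [List.foldl_cons]
    split_ifs with h1 h2 h3 h4 <;> rw [ih] <;> clear ih <;>
      simp_all [pvCnt, Prod.ext_iff] <;> omega

-- A's outer fold, appending one value to each of the four lists, is four maps
lemma pl_outer (f1 f2 f3 f4 : Int → Int) : ∀ (js : List Int) (as cs gs ts : List Int),
    js.foldl
      (fun (st : List Int × List Int × List Int × List Int) j =>
        (st.1 ++ [f1 j], st.2.1 ++ [f2 j], st.2.2.1 ++ [f3 j], st.2.2.2 ++ [f4 j]))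
      (as, cs, gs, ts)
    = (as ++ js.map f1, cs ++ js.map f2, gs ++ js.map f3, ts ++ js.map f4) := by
  intro js
  induction js with
  | nil => intro as cs gs ts; simp
  | cons j js ih => intro as cs gs ts; simp [ih]

-- ===== VERDICT (by name: the statement is the Claim_ definition above) =====
theorem profile_laplace_spec : Claim_equal_profile_laplace := by
  intro motifs _ _
  show profile_laplace motifs = profile_laplace_alt motifs
  unfold profile_laplace profile_laplace_alt
  simp only [pl_inner, pl_outer, List.nil_append]
  have hsum : ∀ (b : Char) (j : Int),
      motifs.foldl (fun s m => s + (if PySem.Str.pyGet? m j = some b then (1 : Int) else 0)) 0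
      = pvCnt motifs b j := by
    intro b j
    rw [PySem.List.foldl_add motifs (fun m => if PySem.Str.pyGet? m j = some b then (1 : Int) else 0) 0]
    simp [pvCnt]
  simp only [hsum]
  have hACGT : "ACGT".toList = ['A', 'C', 'G', 'T'] := by decide
  rw [hACGT]
  simp [add_comm]
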